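-- pv_equiv track=rewrite | github.com/heiest/Python-1133 | CSCI 1133/hw05.py | change_key
-- ===== SOURCE A (Python) =====
-- def change_key(notes, up):
--     '''
--     Purpose:
--     Given a list of strings representing notes, and an integer representing the amount of steps up an octave you want to go, return a new string represting the original shifted according to the scale provided
--     Parameter(s):
--     - notes: notes is the list of strings representing a bunch of notes that are inputted
--     - up: the integer value representing how many steps up or down the octave each note needs to be shifted according to the original scale
--     Return Value(s):
--     A new list of strings or notes that are shifted according to the set integer and in reference to the scale provided
--     '''
--     scale = ['A', 'A#', 'B', 'C', 'C#', 'D', 'D#', 'E', 'F', 'F#', 'G', 'G#']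
--     shifted = []
--     for x in range(len(notes)):
--         for y in range(len(scale)):
--             if notes[x] == scale[y]:
--                 step = y + up
--                 if abs(step) < len(scale):
--                     shifted.append(scale[step])
--                 else:
--                     step = step % 12
--                     shifted.append(scale[step])
--     return shifted
-- ===== SOURCE B (Python) =====
-- _BASE = {'A': 0, 'B': 2, 'C': 3, 'D': 5, 'E': 7, 'F': 8, 'G': 10}
-- _LETTERS = 'AABCCDDEFFGG'
--
--
-- def _semitone(n):
--     # parse a note name into its chromatic number 0..11, or None if n is not a note
--     if n and n[0] in _BASE:
--         b = _BASE[n[0]]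
--         if len(n) == 1:
--             return b
--         if n == n[0] + '#' and b != 2 and b != 7:  # B# and E# do not exist
--             return b + 1
--     return None
--
--
-- def _name(k):
--     # render chromatic number 0..11 back to a note name: letter plus optional sharp
--     c = _LETTERS[k]
--     return c if _BASE[c] == k else c + '#'
--
--
-- def change_key(notes, up):
--     out = []
--     for n in notes:
--         k = _semitone(n)
--         if k is not None:
--             out.append(_name((k + up) % 12))
--     return out
-- ===== Notes on version B (the rewrite author's own statement) =====
-- stated objective: alternative
-- what changed: B drops A's 12-entry scale table scan entirely: it parses each note name into a chromatic number (a 7-letter base map plus one for a trailing '#', rejecting non-notes such as 'B#'), adds up modulo 12, and renders the number back to letter + optional sharp, instead of matching the note against every scale entry and indexing the scale.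
import Mathlib
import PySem

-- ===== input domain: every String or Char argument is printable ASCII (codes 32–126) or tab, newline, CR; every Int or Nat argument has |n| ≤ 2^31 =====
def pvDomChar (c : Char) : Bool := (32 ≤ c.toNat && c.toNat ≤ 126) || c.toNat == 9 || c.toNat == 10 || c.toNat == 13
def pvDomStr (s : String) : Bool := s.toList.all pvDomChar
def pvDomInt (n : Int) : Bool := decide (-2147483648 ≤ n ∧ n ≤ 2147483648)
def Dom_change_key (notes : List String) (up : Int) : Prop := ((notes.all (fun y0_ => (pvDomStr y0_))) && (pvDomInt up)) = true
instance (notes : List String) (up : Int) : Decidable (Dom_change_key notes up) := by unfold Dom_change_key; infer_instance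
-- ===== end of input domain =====

-- B replaces A's per-note scan of a 12-entry scale table by parsing each note name itself
-- (letter → chromatic number by a 7-letter base map, sharp adds one), adding `up` mod 12,
-- and rendering the number back to letter + optional sharp; objective: alternative.

-- the chromatic scale literal A defines locally
def pyScale : List String := ["A", "A#", "B", "C", "C#", "D", "D#", "E", "F", "F#", "G", "G#"]

-- ===== PORT A =====
-- literal port: for x in range(len(notes)): for y in range(len(scale)): …
-- notes[x] / scale[y] are always in range, and scale[step] is only read with -12 < step < 12
-- (negative Python indexing) or 0 ≤ step%12 < 12, so pyGetD with an unused default is exact here.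
def change_key (notes : List String) (up : Int) : List String :=
  (PySem.List.pyRange 0 (PySem.List.len notes)).foldl (fun shifted x =>
    (PySem.List.pyRange 0 (PySem.List.len pyScale)).foldl (fun shifted y =>
      if PySem.List.pyGetD notes x "" == PySem.List.pyGetD pyScale y "" then
        (let step := y + up
         if step.natAbs < pyScale.length then
           shifted ++ [PySem.List.pyGetD pyScale step ""]
         else
           shifted ++ [PySem.List.pyGetD pyScale (PySem.Int.mod step 12) ""])
      else shifted) shifted) []

-- ===== PORT B =====
-- _BASE = {'A': 0, 'B': 2, 'C': 3, 'D': 5, 'E': 7, 'F': 8, 'G': 10}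
def pyBase : PySem.Dict Char Int := PySem.Dict.mk
  [('A', 0), ('B', 2), ('C', 3), ('D', 5), ('E', 7), ('F', 8), ('G', 10)]

-- _LETTERS = 'AABCCDDEFFGG'
def pyLetters : List Char := ['A', 'A', 'B', 'C', 'C', 'D', 'D', 'E', 'F', 'F', 'G', 'G']

-- def _semitone(n): parse a note name into its chromatic number, else None.
-- `if n and n[0] in _BASE` is folded into the pyGet?/get? option matches (n[0] exists iff n ≠ '');
-- Python's string comparison n == n[0] + '#' is ported as equality of the character lists.
def semitoneB (n : String) : Option Int :=
  match PySem.Str.pyGet? n 0 with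
  | none => none
  | some c =>
    match pyBase.get? c with
    | none => none
    | some b =>
      if PySem.Str.len n = 1 then some b
      else if n.toList = [c, '#'] ∧ b ≠ 2 ∧ b ≠ 7 then some (b + 1)
      else none

-- def _name(k): _LETTERS[k] plus '#' when the letter alone is a semitone lower.
-- only called with 0 ≤ k < 12, so pyGetD/getD with unused defaults are exact here.
def nameB (k : Int) : String :=
  let c := PySem.List.pyGetD pyLetters k ' '
  if pyBase.getD c 99 = k then String.ofList [c] else String.ofList [c, '#']

-- the main loop: out = []; for n in notes: k = _semitone(n); if k is not None: out.append(_name((k+up)%12))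
def change_key_alt (notes : List String) (up : Int) : List String :=
  notes.foldl (fun out n =>
    match semitoneB n with
    | some k => out ++ [nameB (PySem.Int.mod (k + up) 12)]
    | none => out) []

-- ===== PRECONDITION & SPEC =====
def Spec_change_key (notes : List String) (up : Int) (out : List String) : Prop := out = change_key_alt notes up
instance (notes : List String) (up : Int) (out : List String) : Decidable (Spec_change_key notes up out) := by unfold Spec_change_key; infer_instance

-- ===== CLAIM (what is proved, stated in full; the proofs are below) =====
def Claim_equal_change_key : Prop := ∀ (notes : List String) (up : Int), Dom_change_key notes up → Spec_change_key notes up (change_key notes up)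

-- ===== LEMMAS AND PROOFS =====

-- pushing the common `shifted ++ [·]` out of A's branch pair
lemma append_ite (c : Prop) [Decidable c] (sh : List String) (a b : String) :
    (if c then sh ++ [a] else sh ++ [b]) = sh ++ [if c then a else b] := by
  split_ifs <;> rfl

-- A's value for a matched note at scale index i always equals scale[(i+up) % 12]
lemma step_val (i up : Int) :
    (if (i + up).natAbs < pyScale.length then PySem.List.pyGetD pyScale (i + up) ""
     else PySem.List.pyGetD pyScale (PySem.Int.mod (i + up) 12) "")
    = PySem.List.pyGetD pyScale (PySem.Int.mod (i + up) 12) "" := by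
  split_ifs with hlt
  · have h1 : -12 < i + up := by simp [pyScale] at hlt; omega
    have h2 : i + up < 12 := by simp [pyScale] at hlt; omega
    interval_cases h : (i + up) <;> decide
  · rfl

-- B's renderer agrees with A's scale table on 0 ≤ k < 12
lemma name_eq (k : Int) (h0 : 0 ≤ k) (h1 : k < 12) :
    nameB k = PySem.List.pyGetD pyScale k "" := by
  interval_cases k <;> decide

-- a note equal to none of the twelve scale strings parses to None
set_option maxHeartbeats 8000000 in
lemma semitone_none (n : String)
    (h : ∀ s ∈ pyScale, n ≠ s) : semitoneB n = none := by
  unfold semitoneB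
  cases hg : PySem.Str.pyGet? n 0 with
  | none => rfl
  | some c =>
    have hl : PySem.List.pyGet? n.toList 0 = some c := by
      have := hg; simpa using this
    cases hb : pyBase.get? c with
    | none => simp only [hb]
    | some b =>
      simp only [hb]
      have hc : (c = 'A' ∧ b = 0) ∨ (c = 'B' ∧ b = 2) ∨ (c = 'C' ∧ b = 3) ∨
          (c = 'D' ∧ b = 5) ∨ (c = 'E' ∧ b = 7) ∨ (c = 'F' ∧ b = 8) ∨ (c = 'G' ∧ b = 10) := by
        simp only [pyBase, PySem.Dict.get?, Option.map_eq_some_iff] at hb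
        obtain ⟨p, hf, hpb⟩ := hb
        obtain ⟨c', b'⟩ := p
        have hpc : c' = c := by simpa using List.find?_some hf
        have hmem := List.mem_of_find?_eq_some hf
        subst hpc; subst hpb
        simp only [List.mem_cons, List.not_mem_nil, or_false, Prod.mk.injEq] at hmem
        rcases hmem with ⟨h1, h2⟩|⟨h1, h2⟩|⟨h1, h2⟩|⟨h1, h2⟩|⟨h1, h2⟩|⟨h1, h2⟩|⟨h1, h2⟩ <;>
          subst h1 <;> subst h2 <;>
          first
          | exact Or.inl ⟨rfl, rfl⟩
          | exact Or.inr (Or.inl ⟨rfl, rfl⟩)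
          | exact Or.inr (Or.inr (Or.inl ⟨rfl, rfl⟩))
          | exact Or.inr (Or.inr (Or.inr (Or.inl ⟨rfl, rfl⟩)))
          | exact Or.inr (Or.inr (Or.inr (Or.inr (Or.inl ⟨rfl, rfl⟩))))
          | exact Or.inr (Or.inr (Or.inr (Or.inr (Or.inr (Or.inl ⟨rfl, rfl⟩)))))
          | exact Or.inr (Or.inr (Or.inr (Or.inr (Or.inr (Or.inr ⟨rfl, rfl⟩)))))
      have hlen : PySem.Str.len n = (n.toList.length : Int) := by simp [PySem.Str.len]
      split_ifs with h1 h2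
      · -- len n == 1 ⇒ n is the bare letter, excluded by h
        exfalso
        have : n.toList.length = 1 := by omega
        obtain ⟨c0, hc0⟩ := List.length_eq_one_iff.mp this
        rw [hc0] at hl
        simp [PySem.List.pyGet?, PySem.List.pyIdx?] at hl
        have hn : n.toList = [c] := by rw [hc0, hl]
        rcases hc with ⟨hc, _⟩|⟨hc, _⟩|⟨hc, _⟩|⟨hc, _⟩|⟨hc, _⟩|⟨hc, _⟩|⟨hc, _⟩ <;> subst hc
        · exact h "A" (by decide) (String.toList_inj.mp hn)
        · exact h "B" (by decide) (String.toList_inj.mp hn)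
        · exact h "C" (by decide) (String.toList_inj.mp hn)
        · exact h "D" (by decide) (String.toList_inj.mp hn)
        · exact h "E" (by decide) (String.toList_inj.mp hn)
        · exact h "F" (by decide) (String.toList_inj.mp hn)
        · exact h "G" (by decide) (String.toList_inj.mp hn)
      · -- n == letter + '#' ⇒ n is the sharp note, excluded by h
        exfalso
        obtain ⟨hn, hb2, hb7⟩ := h2
        rcases hc with ⟨hc, hbv⟩|⟨hc, hbv⟩|⟨hc, hbv⟩|⟨hc, hbv⟩|⟨hc, hbv⟩|⟨hc, hbv⟩|⟨hc, hbv⟩ <;> subst hc <;> subst hbv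
        · exact h "A#" (by decide) (String.toList_inj.mp hn)
        · exact absurd rfl hb2
        · exact h "C#" (by decide) (String.toList_inj.mp hn)
        · exact h "D#" (by decide) (String.toList_inj.mp hn)
        · exact absurd rfl hb7
        · exact h "F#" (by decide) (String.toList_inj.mp hn)
        · exact h "G#" (by decide) (String.toList_inj.mp hn)
      · rfl

-- the per-note option B appends (match … written as Option.elim)
def optOut (up : Int) (n : String) : List String :=
  (semitoneB n).elim [] (fun k => [nameB (PySem.Int.mod (k + up) 12)])

-- the inner scale scan of A, for one note, appends exactly B's parsed-and-rendered note
set_option maxHeartbeats 2000000 in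
lemma inner_eq (n : String) (up : Int) (acc : List String) :
    ((PySem.List.pyRange 0 (PySem.List.len pyScale)).foldl (fun shifted y =>
      if n == PySem.List.pyGetD pyScale y "" then
        (let step := y + up
         if step.natAbs < pyScale.length then
           shifted ++ [PySem.List.pyGetD pyScale step ""]
         else
           shifted ++ [PySem.List.pyGetD pyScale (PySem.Int.mod step 12) ""])
      else shifted) acc)
    = acc ++ optOut up n := by
  rw [show PySem.List.pyRange 0 (PySem.List.len pyScale) = [0,1,2,3,4,5,6,7,8,9,10,11] from by decide]
  simp only [List.foldl_cons, List.foldl_nil, append_ite,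
    step_val 0 up, step_val 1 up, step_val 2 up, step_val 3 up, step_val 4 up, step_val 5 up,
    step_val 6 up, step_val 7 up, step_val 8 up, step_val 9 up, step_val 10 up, step_val 11 up,
    show PySem.List.pyGetD pyScale (0:Int) "" = "A" from by decide,
    show PySem.List.pyGetD pyScale (1:Int) "" = "A#" from by decide,
    show PySem.List.pyGetD pyScale (2:Int) "" = "B" from by decide,
    show PySem.List.pyGetD pyScale (3:Int) "" = "C" from by decide,
    show PySem.List.pyGetD pyScale (4:Int) "" = "C#" from by decide,
    show PySem.List.pyGetD pyScale (5:Int) "" = "D" from by decide,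
    show PySem.List.pyGetD pyScale (6:Int) "" = "D#" from by decide,
    show PySem.List.pyGetD pyScale (7:Int) "" = "E" from by decide,
    show PySem.List.pyGetD pyScale (8:Int) "" = "F" from by decide,
    show PySem.List.pyGetD pyScale (9:Int) "" = "F#" from by decide,
    show PySem.List.pyGetD pyScale (10:Int) "" = "G" from by decide,
    show PySem.List.pyGetD pyScale (11:Int) "" = "G#" from by decide]
  by_cases h0 : n = "A"
  · subst h0
    simp only [show semitoneB "A" = some (0:Int) from by decide, optOut, Option.elim]
    simp
    all_goals exact (name_eq _ (by omega) (by omega)).symm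
  by_cases h1 : n = "A#"
  · subst h1
    simp only [show semitoneB "A#" = some (1:Int) from by decide, optOut, Option.elim]
    simp
    all_goals exact (name_eq _ (by omega) (by omega)).symm
  by_cases h2 : n = "B"
  · subst h2
    simp only [show semitoneB "B" = some (2:Int) from by decide, optOut, Option.elim]
    simp
    all_goals exact (name_eq _ (by omega) (by omega)).symm
  by_cases h3 : n = "C"
  · subst h3
    simp only [show semitoneB "C" = some (3:Int) from by decide, optOut, Option.elim]
    simp
    all_goals exact (name_eq _ (by omega) (by omega)).symm
  by_cases h4 : n = "C#"
  · subst h4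
    simp only [show semitoneB "C#" = some (4:Int) from by decide, optOut, Option.elim]
    simp
    all_goals exact (name_eq _ (by omega) (by omega)).symm
  by_cases h5 : n = "D"
  · subst h5
    simp only [show semitoneB "D" = some (5:Int) from by decide, optOut, Option.elim]
    simp
    all_goals exact (name_eq _ (by omega) (by omega)).symm
  by_cases h6 : n = "D#"
  · subst h6
    simp only [show semitoneB "D#" = some (6:Int) from by decide, optOut, Option.elim]
    simp
    all_goals exact (name_eq _ (by omega) (by omega)).symm
  by_cases h7 : n = "E"
  · subst h7
    simp only [show semitoneB "E" = some (7:Int) from by decide, optOut, Option.elim]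
    simp
    all_goals exact (name_eq _ (by omega) (by omega)).symm
  by_cases h8 : n = "F"
  · subst h8
    simp only [show semitoneB "F" = some (8:Int) from by decide, optOut, Option.elim]
    simp
    all_goals exact (name_eq _ (by omega) (by omega)).symm
  by_cases h9 : n = "F#"
  · subst h9
    simp only [show semitoneB "F#" = some (9:Int) from by decide, optOut, Option.elim]
    simp
    all_goals exact (name_eq _ (by omega) (by omega)).symm
  by_cases h10 : n = "G"
  · subst h10
    simp only [show semitoneB "G" = some (10:Int) from by decide, optOut, Option.elim]
    simp
    all_goals exact (name_eq _ (by omega) (by omega)).symm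
  by_cases h11 : n = "G#"
  · subst h11
    simp only [show semitoneB "G#" = some (11:Int) from by decide, optOut, Option.elim]
    simp
    all_goals exact (name_eq _ (by omega) (by omega)).symm
  have hnone : semitoneB n = none := semitone_none n (by
    intro s hs; fin_cases hs <;> simp [h0, h1, h2, h3, h4, h5, h6, h7, h8, h9, h10, h11])
  simp [optOut, hnone, h0, h1, h2, h3, h4, h5, h6, h7, h8, h9, h10, h11]

-- ===== VERDICT (by name: the statement is the Claim_ definition above) =====
theorem change_key_spec : Claim_equal_change_key := by
  intro notes up _
  unfold Spec_change_key
  have hb := PySem.List.foldl_pyRange_pyGetD (xs := notes) (d := "")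
    (f := fun shifted n =>
      (PySem.List.pyRange 0 (PySem.List.len pyScale)).foldl (fun shifted y =>
        if n == PySem.List.pyGetD pyScale y "" then
          (let step := y + up
           if step.natAbs < pyScale.length then
             shifted ++ [PySem.List.pyGetD pyScale step ""]
           else
             shifted ++ [PySem.List.pyGetD pyScale (PySem.Int.mod step 12) ""])
        else shifted) shifted)
    (init := []) (a := 0) (by norm_num)
  simp only [Int.toNat_zero, List.drop_zero] at hb
  calc change_key notes up
      = List.foldl (fun shifted n =>
          (PySem.List.pyRange 0 (PySem.List.len pyScale)).foldl (fun shifted y =>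
            if n == PySem.List.pyGetD pyScale y "" then
              (let step := y + up
               if step.natAbs < pyScale.length then
                 shifted ++ [PySem.List.pyGetD pyScale step ""]
               else
                 shifted ++ [PySem.List.pyGetD pyScale (PySem.Int.mod step 12) ""])
            else shifted) shifted) [] notes := hb
    _ = List.foldl (fun acc n => acc ++ optOut up n) [] notes := by
          rw [show (fun (shifted : List String) n =>
            (PySem.List.pyRange 0 (PySem.List.len pyScale)).foldl (fun shifted y =>
              if n == PySem.List.pyGetD pyScale y "" then
                (let step := y + up
                 if step.natAbs < pyScale.length then
                   shifted ++ [PySem.List.pyGetD pyScale step ""]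
                 else
                   shifted ++ [PySem.List.pyGetD pyScale (PySem.Int.mod step 12) ""])
              else shifted) shifted)
            = (fun (acc : List String) n => acc ++ optOut up n)
            from funext fun acc => funext fun n => inner_eq n up acc]
    _ = change_key_alt notes up := by
          unfold change_key_alt
          congr 1
          funext out n
          unfold optOut
          cases semitoneB n <;> simp
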